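-- pv_equiv track=rewrite | github.com/rslinford/Advent_of_Code_2016 | Day_06.py | tally_chars
-- ===== SOURCE A (Python) =====
-- def tally_chars(data, index):
--     char_tallies = {}
--     for x in data:
--         c = x[index]
--         if c in char_tallies.keys():
--             char_tallies[c] += 1
--         else:
--             char_tallies[c] = 1
--     return char_tallies
-- ===== SOURCE B (Python) =====
-- def tally_chars(data, index):
--     def go(col):
--         if not col:
--             return {}
--         c = col[0]
--         rest = [d for d in col if d != c]
--         out = {c: len(col) - len(rest)}
--         out.update(go(rest))
--         return out
--     return go([x[index] for x in data])
-- ===== Notes on version B (the rewrite author's own statement) =====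
-- stated objective: alternative
-- what changed: Replaces the one-pass dict accumulation with a recursive partition scheme: take the first remaining character, count it as the shrinkage of a filter pass that removes all its occurrences, and recurse on the filtered remainder, so no running counts are ever maintained.
import Mathlib
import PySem

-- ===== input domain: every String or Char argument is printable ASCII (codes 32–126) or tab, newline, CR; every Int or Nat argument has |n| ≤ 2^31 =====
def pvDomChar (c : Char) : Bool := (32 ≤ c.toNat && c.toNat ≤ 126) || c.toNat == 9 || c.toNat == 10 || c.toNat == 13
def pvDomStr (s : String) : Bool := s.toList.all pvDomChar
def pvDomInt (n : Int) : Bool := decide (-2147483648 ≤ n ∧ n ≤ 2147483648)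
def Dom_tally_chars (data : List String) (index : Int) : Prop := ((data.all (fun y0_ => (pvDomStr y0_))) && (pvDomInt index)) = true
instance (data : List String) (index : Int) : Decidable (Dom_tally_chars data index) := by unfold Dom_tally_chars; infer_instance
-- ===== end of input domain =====

-- B replaces A's one-pass dict accumulation by a recursive partition: take the first
-- remaining column character, count it as the length drop of a filter pass removing it,
-- and recurse on the remainder.


-- ===== PORT A =====
-- c = x[index]: a one-char Python string; the "" default is unreachable under Pre_
def tallyCharA (x : String) (index : Int) : String :=
  match PySem.Str.pyGet? x index with
  | some ch => String.ofList [ch]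
  | none => ""

def tally_chars (data : List String) (index : Int) : List (String × Int) :=
  (data.foldl
    (fun char_tallies x =>
      let c := tallyCharA x index
      if char_tallies.contains c then
        char_tallies.insert c (char_tallies.getD c 0 + 1)
      else
        char_tallies.insert c 1)
    PySem.Dict.empty).items

-- ===== PORT B =====
def tallyCharB (x : String) (index : Int) : String :=
  match PySem.Str.pyGet? x index with
  | some ch => String.ofList [ch]
  | none => ""

-- go(col): the dict literal {c: n} updated with go(rest) has pairwise-fresh keys,
-- so its items are exactly the cons below.
def tallyGo (col : List String) : List (String × Int) :=
  match col with
  | [] => []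
  | c :: tl =>
    let rest := List.filter (fun d => d ≠ c) (c :: tl)
    (c, ((c :: tl).length : Int) - (rest.length : Int)) :: tallyGo rest
termination_by col.length
decreasing_by
  simp only [List.length_cons, List.filter_cons]
  simp only [decide_not, ne_eq, not_true_eq_false, decide_false]
  exact Nat.lt_succ_of_le (List.length_filter_le _ _)

def tally_chars_alt (data : List String) (index : Int) : List (String × Int) :=
  tallyGo (data.map (fun x => tallyCharB x index))

-- ===== PRECONDITION & SPEC =====
-- Pre_ excludes exactly the inputs where x[index] raises IndexError in Python A (and B).
def Pre_tally_chars (data : List String) (index : Int) : Prop :=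
  ∀ x ∈ data, PySem.Raise.InRange x.toList.length index
instance (data : List String) (index : Int) : Decidable (Pre_tally_chars data index) := by
  unfold Pre_tally_chars; infer_instance

def pvWitness_tally_chars : List String × Int := (["ab", "cb", "ab"], 0)

def Spec_tally_chars (data : List String) (index : Int) (out : List (String × Int)) : Prop := out = tally_chars_alt data index
instance (data : List String) (index : Int) (out : List (String × Int)) : Decidable (Spec_tally_chars data index out) := by unfold Spec_tally_chars; infer_instance

-- ===== CLAIM (what is proved, stated in full; the proofs are below) =====
def Claim_equal_tally_chars : Prop := ∀ (data : List String) (index : Int), Dom_tally_chars data index → Pre_tally_chars data index → Spec_tally_chars data index (tally_chars data index)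

-- ===== LEMMAS AND PROOFS =====
-- A's branch is a single counter-insert: when c is absent, getD c 0 = 0.
lemma tally_step_eq (d : PySem.Dict String Int) (c : String) :
    (if d.contains c then d.insert c (d.getD c 0 + 1) else d.insert c 1)
      = d.insert c (d.getD c 0 + 1) := by
  by_cases h : d.contains c = true
  · simp [h]
  · have hn : d.get? c = none :=
      (PySem.Dict.get?_eq_none_iff_contains d c).mpr (by simpa using h)
    simp [h, PySem.Dict.getD, hn]

-- Elements already present are skipped by Set.add, so filtering them out is a no-op.
lemma foldl_add_filter_of_mem (c : String) :
    ∀ (tl : List String) (acc : PySem.Set String), c ∈ acc →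
      tl.foldl PySem.Set.add acc = (tl.filter (fun d => d ≠ c)).foldl PySem.Set.add acc := by
  intro tl
  induction tl with
  | nil => intro acc _; rfl
  | cons d tl ih =>
    intro acc hc
    by_cases hd : d = c
    · subst hd
      have hskip : PySem.Set.add acc d = acc := by
        simp [PySem.Set.add]
        exact hc
      simp [hskip, ih acc hc]
    · have hc' : c ∈ PySem.Set.add acc d := by
        simp [PySem.Set.add]; split <;> simp [hc]
      simp [hd, List.foldl_cons, ih _ hc']

-- Prepending an element no later element repeats commutes with the dedup fold.
lemma foldl_add_fresh (a : String) :
    ∀ (ys : List String) (b : PySem.Set String), (∀ y ∈ ys, y ≠ a) →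
      ys.foldl PySem.Set.add (a :: b) = a :: ys.foldl PySem.Set.add b := by
  intro ys
  induction ys with
  | nil => intro b _; rfl
  | cons y ys ih =>
    intro b hy
    have hya : y ≠ a := hy y (by simp)
    have hstep : PySem.Set.add (a :: b) y = a :: PySem.Set.add b y := by
      simp [PySem.Set.add, hya]
      split <;> simp
    simp only [List.foldl_cons, hstep]
    exact ih _ (fun z hz => hy z (by simp [hz]))

-- First-occurrence dedup of c :: tl is c followed by the dedup of tl with c removed.
lemma ofList_cons_filter (c : String) (tl : List String) :
    PySem.Set.ofList (c :: tl)
      = c :: PySem.Set.ofList (tl.filter (fun d => d ≠ c)) := by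
  unfold PySem.Set.ofList
  have h1 : (c :: tl).foldl PySem.Set.add PySem.Set.empty
      = tl.foldl PySem.Set.add (c :: PySem.Set.empty) := by
    simp [PySem.Set.add, PySem.Set.empty]
  rw [h1, foldl_add_filter_of_mem c tl _ (by simp)]
  exact foldl_add_fresh c _ _ (by
    intro y hy
    have := List.of_mem_filter hy
    simpa using this)

-- count of the head equals the length removed by filtering it out.
lemma count_head_eq (c : String) (col : List String) :
    List.count c col + (col.filter (fun d => d ≠ c)).length = col.length := by
  have hfe : (fun d : String => d == c) = (fun d => decide (d = c)) :=
    funext fun d => by by_cases h : d = c <;> simp [h]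
  have hne : (fun d : String => decide (d ≠ c)) = (fun d => !(decide (d = c))) :=
    funext fun d => by by_cases h : d = c <;> simp [h]
  have hcnt : List.count c col = (col.filter (fun d => decide (d = c))).length := by
    rw [List.count, List.countP_eq_length_filter, hfe]
  rw [hcnt, hne]
  exact (List.length_eq_length_filter_add (l := col) (fun d => decide (d = c))).symm

-- B's recursion computes exactly the (distinct key, multiplicity) table of the column.
lemma tallyGo_eq_counts : ∀ (col : List String),
    tallyGo col = (PySem.Set.ofList col).map (fun k => (k, (List.count k col : Int))) := by
  intro col
  induction hn : col.length using Nat.strong_induction_on generalizing col with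
  | _ n ih =>
    match col with
    | [] => simp [tallyGo]
    | c :: tl =>
      have hfc : List.filter (fun d => d ≠ c) (c :: tl) = tl.filter (fun d => d ≠ c) := by
        simp
      have hlt : (tl.filter (fun d => d ≠ c)).length < n := by
        subst hn
        exact Nat.lt_succ_of_le (List.length_filter_le _ _)
      rw [tallyGo, hfc, ih _ hlt _ rfl, ofList_cons_filter]
      simp only [List.map_cons]
      congr 1
      · have hcount := count_head_eq c (c :: tl)
        rw [hfc] at hcount
        simp only [Prod.mk.injEq, decide_not] at hcount ⊢
        refine ⟨by trivial, ?_⟩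
        omega
      · apply List.map_congr_left
        intro k hk
        have hk' : k ≠ c := by
          have hmem := (PySem.Set.mem_ofList _ _).mp hk
          simpa using List.of_mem_filter hmem
        simp only [Prod.mk.injEq, decide_not]
        refine ⟨trivial, ?_⟩
        simp [List.count_filter, hk', Ne.symm hk']

-- ===== VERDICT (by name: the statement is the Claim_ definition above) =====
theorem tally_chars_spec : Claim_equal_tally_chars := by
  intro data index _ _
  unfold Spec_tally_chars tally_chars tally_chars_alt
  have hkey : tallyCharB = tallyCharA := rfl
  have hstep : (fun (d : PySem.Dict String Int) (x : String) =>
      let c := tallyCharA x index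
      if d.contains c then d.insert c (d.getD c 0 + 1) else d.insert c 1)
      = fun d x => d.insert (tallyCharA x index) (d.getD (tallyCharA x index) 0 + 1) :=
    funext fun d => funext fun x => tally_step_eq d _
  have hfold : List.foldl (fun (d : PySem.Dict String Int) x =>
        d.insert (tallyCharA x index) (d.getD (tallyCharA x index) 0 + 1)) PySem.Dict.empty data
      = List.foldl (fun d c => d.insert c (d.getD c 0 + 1)) PySem.Dict.empty
        (data.map (fun x => tallyCharA x index)) := (List.foldl_map (f := fun x => tallyCharA x index)
        (g := fun (d : PySem.Dict String Int) c => d.insert c (d.getD c 0 + 1))).symm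
  rw [hkey, hstep, hfold,
    PySem.Dict.foldl_insert_getD_add_one_eq_counter, PySem.Dict.items_counter,
    tallyGo_eq_counts]
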